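-- pv_equiv track=rewrite | github.com/06rajesh/intent-slot-classification-nlu | utils.py | get_word_limits
-- ===== SOURCE A (Python) =====
-- def get_word_limits(sentence: str) -> list:
--     limits = list()
--     start: int = 0
--     for c in range(0, len(sentence)):
--         if sentence[c] == " ":
--             limits.append([start, c-1])
--             start = c + 1
--         elif c == len(sentence)-1:
--             limits.append([start, c])
--     return limits
-- ===== SOURCE B (Python) =====
-- def get_word_limits(sentence: str) -> list:
--     segments = sentence.split(' ')
--     if segments and segments[-1] == '':
--         segments.pop()
--     limits = []
--     start = 0
--     for seg in segments:
--         limits.append([start, start + len(seg) - 1])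
--         start += len(seg) + 1
--     return limits
-- ===== Notes on version B (the rewrite author's own statement) =====
-- stated objective: faster
-- what changed: B tokenizes once with str.split and walks the segment list with a running start index (dropping a trailing empty segment), instead of testing every character in a Python-level loop with index/boundary bookkeeping.
import Mathlib
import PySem

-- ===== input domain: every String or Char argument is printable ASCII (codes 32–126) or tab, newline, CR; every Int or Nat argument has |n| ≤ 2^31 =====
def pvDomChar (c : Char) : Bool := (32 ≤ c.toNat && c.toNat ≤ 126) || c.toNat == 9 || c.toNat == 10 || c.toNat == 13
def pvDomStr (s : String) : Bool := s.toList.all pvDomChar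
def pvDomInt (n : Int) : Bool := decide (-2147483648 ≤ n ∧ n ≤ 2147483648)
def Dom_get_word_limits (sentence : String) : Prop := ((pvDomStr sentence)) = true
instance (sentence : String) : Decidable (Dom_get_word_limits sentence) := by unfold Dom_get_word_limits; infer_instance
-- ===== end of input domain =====

-- B replaces A's per-character index scan by one str.split plus a running-start walk over
-- the segment list (dropping a trailing empty segment); fewer Python-level steps per char.

-- ===== PORT A =====
-- literal transliteration of A: fold over range(0, len(sentence)) carrying (limits, start)
def get_word_limits (sentence : String) : List (List Int) :=
  let cs := sentence.toList
  let r := (PySem.List.pyRange 0 (cs.length : Int) 1).foldl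
    (fun (st : List (List Int) × Int) c =>
      if PySem.List.pyGetD cs c ' ' = ' ' then
        (st.1 ++ [[st.2, c - 1]], c + 1)
      else if c = (cs.length : Int) - 1 then
        (st.1 ++ [[st.2, c]], st.2)
      else st)
    ([], 0)
  r.1

-- ===== PORT B =====
-- literal transliteration of B: split on ' ', pop a trailing empty segment, walk segments
def get_word_limits_alt (sentence : String) : List (List Int) :=
  let segments := PySem.Chars.splitOn sentence.toList [' ']
  let segments := if segments ≠ [] ∧ PySem.List.pyGet? segments (-1) = some [] then
      segments.dropLast else segments
  let r := segments.foldl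
    (fun (st : List (List Int) × Int) seg =>
      (st.1 ++ [[st.2, st.2 + (seg.length : Int) - 1]], st.2 + (seg.length : Int) + 1))
    ([], 0)
  r.1

-- ===== PRECONDITION & SPEC =====
def Spec_get_word_limits (sentence : String) (out : List (List Int)) : Prop := out = get_word_limits_alt sentence
instance (sentence : String) (out : List (List Int)) : Decidable (Spec_get_word_limits sentence out) := by unfold Spec_get_word_limits; infer_instance

-- ===== CLAIM (what is proved, stated in full; the proofs are below) =====
def Claim_equal_get_word_limits : Prop := ∀ (sentence : String), Dom_get_word_limits sentence → Spec_get_word_limits sentence (get_word_limits sentence)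

-- ===== LEMMAS AND PROOFS =====

-- A's loop as structural recursion on the remaining characters (index i, state (limits, start))
def fA2 : List Char → Int → (List (List Int) × Int) → (List (List Int) × Int)
  | [], _, st => st
  | c :: rest, i, st =>
    if c = ' ' then fA2 rest (i + 1) (st.1 ++ [[st.2, i - 1]], i + 1)
    else if rest = [] then fA2 rest (i + 1) (st.1 ++ [[st.2, i]], st.2)
    else fA2 rest (i + 1) st

-- front-recursive splitter on ' ' with the current (reversed) segment as accumulator
def goS : List Char → List Char → List (List Char)
  | [], cur => [cur.reverse]
  | c :: rest, cur => if c = ' ' then cur.reverse :: goS rest [] else goS rest (c :: cur)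

-- drop a trailing empty segment
def trimSeg (l : List (List Char)) : List (List Char) :=
  if l.getLast? = some [] then l.dropLast else l

-- spans of consecutive segments from a running start
def spans : List (List Char) → Int → List (List Int)
  | [], _ => []
  | seg :: rest, start => [start, start + (seg.length : Int) - 1] :: spans rest (start + (seg.length : Int) + 1)

theorem goS_ne_nil (l cur : List Char) : goS l cur ≠ [] := by
  induction l generalizing cur with
  | nil => simp [goS]
  | cons c rest ih => simp only [goS]; split_ifs <;> simp [ih]

theorem splitOn_go_eq (fuel : Nat) :
    ∀ (l cur : List Char) (acc : List (List Char)), l.length < fuel →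
      PySem.Chars.splitOn.go [' '] fuel l cur acc = acc.reverse ++ goS l cur := by
  induction fuel with
  | zero => intro l cur acc h; omega
  | succ fuel ih =>
    intro l cur acc h
    cases l with
    | nil =>
      rw [PySem.Chars.splitOn.go]
      simp [goS]
      all_goals omega
    | cons c rest =>
      rw [PySem.Chars.splitOn.go]
      by_cases hc : c = ' '
      · have hp : [' '].isPrefixOf (c :: rest) = true := by simp [hc, List.isPrefixOf]
        simp only [hp, if_pos]
        rw [ih _ _ _ (by simp at h ⊢; omega)]
        simp [goS, hc]
      · have hp : [' '].isPrefixOf (c :: rest) = false := by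
          simp [List.isPrefixOf]; exact fun h' => absurd h'.symm hc
        simp only [hp]
        rw [if_neg (by simp)]
        rw [ih _ _ _ (by simp at h ⊢; omega)]
        simp [goS, hc]

theorem splitOn_eq_goS (cs : List Char) :
    PySem.Chars.splitOn cs [' '] = goS cs [] := by
  show PySem.Chars.splitOn.go [' '] (cs.length + 1) cs [] [] = _
  rw [splitOn_go_eq (cs.length + 1) cs [] [] (by omega)]
  rfl

-- A's range-indexed fold equals fA2 on the corresponding suffix
theorem foldA_eq_fA2 (cs : List Char) :
    ∀ (s : Nat) (st : List (List Int) × Int), s ≤ cs.length →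
      (PySem.List.pyRange (s : Int) (cs.length : Int) 1).foldl
        (fun (st : List (List Int) × Int) c =>
          if PySem.List.pyGetD cs c ' ' = ' ' then (st.1 ++ [[st.2, c - 1]], c + 1)
          else if c = (cs.length : Int) - 1 then (st.1 ++ [[st.2, c]], st.2)
          else st) st
      = fA2 (cs.drop s) (s : Int) st := by
  intro s st hs
  by_cases hlt : s < cs.length
  · induction hd : cs.drop s generalizing s st with
    | nil => exact absurd (List.drop_eq_nil_iff.mp hd) (by omega)
    | cons c rest ih =>
      have hcons : PySem.List.pyRange (s : Int) (cs.length : Int) 1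
          = (s : Int) :: PySem.List.pyRange ((s : Int) + 1) (cs.length : Int) 1 :=
        PySem.List.pyRange_one_cons (by exact_mod_cast hlt)
      have hget : PySem.List.pyGetD cs (s : Int) ' ' = cs[s] := by
        rw [PySem.List.pyGetD_natCast]; exact List.getD_eq_getElem _ _ hlt
      have hcd := List.getElem_cons_drop (as := cs) (i := s) hlt
      rw [hd] at hcd
      injection hcd with hc hrest
      rw [hcons, List.foldl_cons]
      have hcast : ((s : Int) + 1) = ((s + 1 : Nat) : Int) := by push_cast; ring
      by_cases hsp : c = ' '
      · rw [if_pos (by rw [hget, hc]; exact hsp)]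
        rcases Nat.lt_or_ge (s + 1) cs.length with h2 | h2
        · rw [hcast, ih (s + 1) _ (by omega) h2 hrest]
          simp [fA2, hsp]
        · have hre : rest = [] := by
            rw [← hrest]; exact List.drop_eq_nil_of_le h2
          have hlen : cs.length = s + 1 := by
            have := congrArg List.length hd
            simp at this; omega
          rw [hcast, hlen]
          rw [PySem.List.pyRange_one_eq_nil (by push_cast; omega)]
          simp [fA2, hsp, hre]
      · rw [if_neg (by rw [hget, hc]; simpa using hsp)]
        by_cases hlast : rest = []
        · have hlen : cs.length = s + 1 := by
            have := congrArg List.length hd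
            simp [hlast] at this; omega
          rw [if_pos (by rw [hlen]; push_cast; ring)]
          rw [hcast, hlen]
          rw [PySem.List.pyRange_one_eq_nil (by push_cast; omega)]
          simp [fA2, hsp, hlast]
        · have h2 : s + 1 < cs.length := by
            have := congrArg List.length hd
            cases rest with
            | nil => exact absurd rfl hlast
            | cons _ _ => simp at this; omega
          rw [if_neg (by omega)]
          rw [hcast, ih (s + 1) st (by omega) h2 hrest]
          simp [fA2, hsp, hlast]
  · have hs' : s = cs.length := by omega
    subst hs'
    rw [PySem.List.pyRange_one_eq_nil le_rfl]
    rw [List.drop_eq_nil_of_le le_rfl]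
    rfl

-- the bridge: A's recursion produces exactly the spans of the trimmed segment list
theorem fA2_eq_spans (cs : List Char) :
    ∀ (cur : List Char) (i : Int) (limits : List (List Int)),
      (cs = [] → cur = []) →
      (fA2 cs i (limits, i - (cur.length : Int))).1
        = limits ++ spans (trimSeg (goS cs cur)) (i - (cur.length : Int)) := by
  induction cs with
  | nil =>
    intro cur i limits h
    rw [h rfl]
    simp [fA2, goS, trimSeg, spans]
  | cons c rest ih =>
    intro cur i limits h
    by_cases hc : c = ' '
    · have h1 : (fA2 (c :: rest) i (limits, i - (cur.length : Int))).1
          = (fA2 rest (i + 1) (limits ++ [[i - (cur.length : Int), i - 1]], i + 1)).1 := by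
        simp [fA2, hc]
      rw [h1]
      have := ih [] (i + 1) (limits ++ [[i - (cur.length : Int), i - 1]]) (fun _ => rfl)
      simp only [List.length_nil, Int.natCast_zero, sub_zero] at this
      rw [this]
      have hne := goS_ne_nil rest []
      have htrim : trimSeg (goS (c :: rest) cur) = cur.reverse :: trimSeg (goS rest []) := by
        rw [show goS (c :: rest) cur = cur.reverse :: goS rest [] from by simp [goS, hc]]
        cases hgo : goS rest [] with
        | nil => exact absurd hgo hne
        | cons x xs =>
          simp only [trimSeg, List.getLast?_cons_cons, List.dropLast_cons₂]
          split_ifs <;> rfl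
      rw [htrim]
      simp [spans]
    · cases rest with
      | nil =>
        have h1 : (fA2 [c] i (limits, i - (cur.length : Int))).1
            = limits ++ [[i - (cur.length : Int), i]] := by
          simp [fA2, hc]
        rw [h1]
        have hg : goS [c] cur = [(c :: cur).reverse] := by simp [goS, hc]
        rw [hg]
        have : trimSeg [(c :: cur).reverse] = [(c :: cur).reverse] := by
          simp [trimSeg]
        rw [this]
        simp [spans]
        omega
      | cons c' rest' =>
        have h1 : (fA2 (c :: c' :: rest') i (limits, i - (cur.length : Int))).1
            = (fA2 (c' :: rest') (i + 1) (limits, i - (cur.length : Int))).1 := by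
          simp [fA2, hc]
        rw [h1]
        have harg : i - (cur.length : Int) = (i + 1) - ((c :: cur).length : Int) := by
          simp only [List.length_cons]; omega
        rw [harg]
        rw [ih (c :: cur) (i + 1) limits (by simp)]
        have : goS (c :: c' :: rest') cur = goS (c' :: rest') (c :: cur) := by
          simp [goS, hc]
        rw [this]

-- B's fold over segments equals spans
theorem foldB_eq_spans (segs : List (List Char)) :
    ∀ (limits : List (List Int)) (start : Int),
      (segs.foldl
        (fun (st : List (List Int) × Int) seg =>
          (st.1 ++ [[st.2, st.2 + (seg.length : Int) - 1]], st.2 + (seg.length : Int) + 1))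
        (limits, start)).1 = limits ++ spans segs start := by
  induction segs with
  | nil => intro limits start; simp [spans]
  | cons seg rest ih =>
    intro limits start
    rw [List.foldl_cons, ih]
    simp [spans]

theorem altB_eq_spans (sentence : String) :
    get_word_limits_alt sentence
      = spans (trimSeg (goS sentence.toList [])) 0 := by
  unfold get_word_limits_alt
  rw [splitOn_eq_goS]
  have hne := goS_ne_nil sentence.toList []
  have hcond : (goS sentence.toList [] ≠ [] ∧
      PySem.List.pyGet? (goS sentence.toList []) (-1) = some ([] : List Char))
      ↔ (goS sentence.toList []).getLast? = some [] := by
    rw [PySem.List.pyGet?_neg_one]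
    simp [hne]
  simp only []
  split_ifs with hif
  · rw [foldB_eq_spans]
    rw [trimSeg, if_pos (hcond.mp hif)]
    rfl
  · rw [foldB_eq_spans]
    rw [trimSeg, if_neg (fun h => hif (hcond.mpr h))]
    rfl

-- ===== VERDICT (by name: the statement is the Claim_ definition above) =====
theorem get_word_limits_spec : Claim_equal_get_word_limits := by
  intro sentence _
  unfold Spec_get_word_limits
  unfold get_word_limits
  have hA := foldA_eq_fA2 sentence.toList 0 ([], 0) (by omega)
  simp only [Int.natCast_zero, List.drop_zero] at hA
  simp only []
  rw [hA, altB_eq_spans]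
  have := fA2_eq_spans sentence.toList [] 0 [] (fun _ => rfl)
  simpa using this
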